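-- pv_equiv track=rewrite | github.com/daniel-reich/ubiquitous-fiesta | H6J4o4jqGbffYXe3Y_12.py | relation_lst
-- ===== SOURCE A (Python) =====
-- def relation_lst(lst):
--   lst = sorted(lst)
--   res = []
--   for a in lst:
--     for b in lst:
--       if a <= b:
--         res.append((a, b))
--   return res
-- ===== SOURCE B (Python) =====
-- def relation_lst(lst):
--   s = sorted(lst)
--   res = []
--   for a in s:
--     # binary search: first index lo with s[lo] >= a (bisect_left, hand-written)
--     lo, hi = 0, len(s)
--     while lo < hi:
--       mid = (lo + hi) // 2
--       if s[mid] < a: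
--         lo = mid + 1
--       else:
--         hi = mid
--     res += [(a, b) for b in s[lo:]]
--   return res
-- ===== Notes on version B (the rewrite author's own statement) =====
-- stated objective: alternative
-- what changed: Instead of rescanning the whole sorted list for each a with an 'a <= b' test, B binary-searches the first index with s[i] >= a and emits pairs from that suffix with no comparison branch.
import Mathlib
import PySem

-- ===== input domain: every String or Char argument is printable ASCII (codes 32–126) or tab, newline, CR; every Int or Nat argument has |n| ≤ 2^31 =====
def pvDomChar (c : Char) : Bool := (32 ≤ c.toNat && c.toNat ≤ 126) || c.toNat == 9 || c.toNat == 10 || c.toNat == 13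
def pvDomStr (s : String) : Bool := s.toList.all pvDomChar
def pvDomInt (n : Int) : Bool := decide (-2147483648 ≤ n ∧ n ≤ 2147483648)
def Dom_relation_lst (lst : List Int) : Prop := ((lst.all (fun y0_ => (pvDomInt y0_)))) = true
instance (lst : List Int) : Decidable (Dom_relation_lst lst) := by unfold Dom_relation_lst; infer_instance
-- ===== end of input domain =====

-- B: instead of rescanning the whole sorted list per a with an 'a <= b' test, binary-search the
-- first index with s[i] >= a and emit the suffix (alternative algorithm; same output-dominated cost).

-- ===== PORT A =====
def relation_lst (lst : List Int) : List (Int × Int) :=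
  let s := PySem.List.sorted lst (fun x => x)
  s.foldl (fun res a =>
    s.foldl (fun r b => if a ≤ b then r ++ [(a, b)] else r) res) []

-- ===== PORT B =====
-- the hand-written while-loop binary search of Source B, as a fuel loop (fuel = len s suffices:
-- hi - lo starts at len s and strictly decreases each iteration)
def bsLoop (xs : List Int) (x : Int) : Nat → Nat → Nat → Nat
  | 0, lo, _ => lo
  | fuel + 1, lo, hi =>
    if lo < hi then
      match xs[(lo + hi) / 2]? with
      | some y => if y < x then bsLoop xs x fuel ((lo + hi) / 2 + 1) hi
                  else bsLoop xs x fuel lo ((lo + hi) / 2)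
      | none => lo
    else lo

def relation_lst_alt (lst : List Int) : List (Int × Int) :=
  let s := PySem.List.sorted lst (fun x => x)
  s.foldl (fun res a =>
    let lo := bsLoop s a s.length 0 s.length
    res ++ (s.drop lo).map (fun b => (a, b))) []   -- s[lo:] with 0 ≤ lo ≤ len s is exactly drop

-- ===== PRECONDITION & SPEC =====
def Spec_relation_lst (lst : List Int) (out : List (Int × Int)) : Prop := out = relation_lst_alt lst
instance (lst : List Int) (out : List (Int × Int)) : Decidable (Spec_relation_lst lst out) := by unfold Spec_relation_lst; infer_instance

-- ===== CLAIM (what is proved, stated in full; the proofs are below) =====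
def Claim_equal_relation_lst : Prop := ∀ (lst : List Int), Dom_relation_lst lst → Spec_relation_lst lst (relation_lst lst)

-- ===== LEMMAS AND PROOFS =====

theorem bsLoop_eq_bisectLeftLoop (xs : List Int) (x : Int) (fuel lo hi : Nat) :
    bsLoop xs x fuel lo hi = PySem.List.bisectLeftLoop xs x fuel lo hi := by
  induction fuel generalizing lo hi with
  | zero => rfl
  | succ n ih =>
    simp only [bsLoop, PySem.List.bisectLeftLoop]
    split
    · cases xs[(lo + hi) / 2]? with
      | none => rfl
      | some y => dsimp only; split <;> exact ih _ _
    · rfl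

theorem bs_eq_bisectLeft (xs : List Int) (x : Int) :
    bsLoop xs x xs.length 0 xs.length = PySem.List.bisectLeft xs x :=
  bsLoop_eq_bisectLeftLoop xs x xs.length 0 xs.length

theorem filter_eq_drop (s : List Int) (x : Int) (r : Nat)
    (_hr : r ≤ s.length)
    (hlt : ∀ (j : Nat) (hj : j < s.length), j < r → s[j] < x)
    (hge : ∀ (j : Nat) (hj : j < s.length), r ≤ j → x ≤ s[j]) :
    s.filter (fun b => x ≤ b) = s.drop r := by
  conv_lhs => rw [← List.take_append_drop r s]
  rw [List.filter_append]
  have h1 : (s.take r).filter (fun b => x ≤ b) = [] := by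
    rw [List.filter_eq_nil_iff]
    intro y hy
    rw [List.mem_iff_getElem] at hy
    obtain ⟨i, hi, rfl⟩ := hy
    have hir : i < r := lt_of_lt_of_le hi (by simp [List.length_take])
    have his : i < s.length := lt_of_lt_of_le hi (by simp)
    rw [List.getElem_take]
    simpa using not_le.mpr (hlt i his hir)
  have h2 : (s.drop r).filter (fun b => x ≤ b) = s.drop r := by
    rw [List.filter_eq_self]
    intro y hy
    rw [List.mem_iff_getElem] at hy
    obtain ⟨i, hi, rfl⟩ := hy
    rw [List.getElem_drop]
    have : r + i < s.length := by simpa [List.length_drop] using Nat.add_lt_of_lt_sub' (by simpa [List.length_drop] using hi)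
    simpa using hge (r + i) this (Nat.le_add_right r i)
  rw [h1, h2, List.nil_append]

-- ===== VERDICT (by name: the statement is the Claim_ definition above) =====
theorem relation_lst_spec : Claim_equal_relation_lst := by
  intro lst _
  unfold Spec_relation_lst relation_lst relation_lst_alt
  set s := PySem.List.sorted lst (fun x => x) with hs
  have hsorted : s.Pairwise (fun a b => a ≤ b) := PySem.List.sorted_pairwise lst (fun x => x)
  have hstep : (fun (res : List (Int × Int)) (a : Int) =>
      s.foldl (fun r b => if a ≤ b then r ++ [(a, b)] else r) res)
    = (fun (res : List (Int × Int)) (a : Int) =>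
      let lo := bsLoop s a s.length 0 s.length
      res ++ (s.drop lo).map (fun b => (a, b))) := by
    funext res a
    obtain ⟨hle, hlt, hge⟩ := PySem.List.bisectLeft_spec s a hsorted
    have := PySem.List.foldl_append_if (fun b => decide (a ≤ b)) (fun b => (a, b)) s res
    simp only [decide_eq_true_eq] at this
    rw [this, bs_eq_bisectLeft, filter_eq_drop s a _ hle hlt hge]
  dsimp only
  rw [hstep]
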